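-- pv_equiv track=rewrite | github.com/kgh-itu/second_year_project | baseline/myutils.py | labels2lookup
-- ===== SOURCE A (Python) =====
-- from typing import List
--
-- def labels2lookup(labels: List[str], PAD):
--     """
--     Convert a list of strings to a lookup dictionary of id's
--
--     Parameters
--     ----------
--     labels : List[str]
--         List of strings to index.
--
--     Returns
--     -------
--     id2label :
--         List with all types of the input.
--     label2id :
--         Lookup dictionary, converting every type of the input to an id.
--     """
--     id2label = [PAD]
--     label2id = {PAD: 0}
--     for label in labels:
--         if label not in label2id:
--             label2id[label] = len(label2id)
--             id2label.append(label)
--     return id2label, label2id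
-- ===== SOURCE B (Python) =====
-- def labels2lookup(labels, PAD):
--     # Dedupe by repeatedly taking the head and filtering its duplicates out of
--     # the remainder -- no seen-set / dict is maintained during the scan.
--     id2label = []
--     rest = [PAD] + labels
--     while rest:
--         head = rest[0]
--         id2label.append(head)
--         rest = [x for x in rest[1:] if x != head]
--     label2id = dict(zip(id2label, range(len(id2label))))
--     return id2label, label2id
-- ===== Notes on version B (the rewrite author's own statement) =====
-- stated objective: alternative
-- what changed: A's single pass with a dict used as a seen-set is replaced by a repeated-filtering nub (take the head, filter its duplicates out of the remainder) that keeps no auxiliary structure, with label2id then built once via dict(zip(id2label, range(len(id2label)))).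
import Mathlib
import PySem

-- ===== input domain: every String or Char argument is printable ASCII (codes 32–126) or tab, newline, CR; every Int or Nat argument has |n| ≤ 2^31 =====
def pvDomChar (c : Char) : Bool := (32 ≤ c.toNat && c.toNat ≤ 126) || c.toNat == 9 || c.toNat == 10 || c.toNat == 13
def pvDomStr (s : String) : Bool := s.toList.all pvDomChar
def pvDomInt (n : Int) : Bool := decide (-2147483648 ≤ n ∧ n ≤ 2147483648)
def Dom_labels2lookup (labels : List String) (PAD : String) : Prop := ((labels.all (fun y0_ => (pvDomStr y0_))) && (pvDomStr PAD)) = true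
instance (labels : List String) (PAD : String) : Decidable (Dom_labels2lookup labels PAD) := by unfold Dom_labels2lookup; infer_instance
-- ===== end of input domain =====

-- B replaces A's single pass with a dict used as a seen-set by a repeated-filtering nub
-- (take the head, filter its duplicates out of the remainder; no auxiliary structure),
-- then builds label2id once via dict(zip(...)); objective: alternative (same return value).

-- ===== PORT A =====
def labels2lookup (labels : List String) (PAD : String) : List String × (List (String × Int)) :=
  let st := labels.foldl
    (fun (st : List String × PySem.Dict String Int) label =>
      if st.2.contains label then st
      else (st.1 ++ [label], st.2.insert label ((st.2.size : Int))))
    ([PAD], PySem.Dict.ofList [(PAD, (0 : Int))])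
  (st.1, st.2.items)

-- ===== PORT B =====
-- B's while loop: pop the head into the accumulator, filter its duplicates out of the rest
def pvNubLoop (id2label : List String) (rest : List String) : List String :=
  match rest with
  | [] => id2label
  | head :: t => pvNubLoop (id2label ++ [head]) (t.filter (fun x => decide (x ≠ head)))
termination_by rest.length
decreasing_by
  simp only [List.length_cons, List.length_unattach]
  exact Nat.lt_succ_of_le (le_trans (List.length_filter_le _ _) (by simp))

def labels2lookup_alt (labels : List String) (PAD : String) : List String × (List (String × Int)) :=
  let id2label := pvNubLoop [] (PAD :: labels)
  let label2id := PySem.Dict.ofList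
    (id2label.zip ((List.range id2label.length).map (fun i : Nat => (i : Int))))
  (id2label, label2id.items)

-- ===== PRECONDITION & SPEC =====
def Spec_labels2lookup (labels : List String) (PAD : String) (out : List String × (List (String × Int))) : Prop := out = labels2lookup_alt labels PAD
instance (labels : List String) (PAD : String) (out : List String × (List (String × Int))) : Decidable (Spec_labels2lookup labels PAD out) := by unfold Spec_labels2lookup; infer_instance

-- ===== CLAIM (what is proved, stated in full; the proofs are below) =====
def Claim_equal_labels2lookup : Prop := ∀ (labels : List String) (PAD : String), Dom_labels2lookup labels PAD → Spec_labels2lookup labels PAD (labels2lookup labels PAD)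

-- ===== LEMMAS AND PROOFS =====

-- unfolding equations for B's well-founded loop
@[simp] lemma pvNubLoop_nil (acc : List String) : pvNubLoop acc [] = acc := by
  rw [pvNubLoop]

@[simp] lemma pvNubLoop_cons (acc : List String) (head : String) (t : List String) :
    pvNubLoop acc (head :: t) = pvNubLoop (acc ++ [head]) (t.filter (fun x => decide (x ≠ head))) := by
  rw [pvNubLoop]

-- the (label, id) pairs that A's dict holds for a given id2label list
def pvPairs (L : List String) : List (String × Int) :=
  (PySem.List.enumerate L 0).map (fun p => (p.2, p.1))

lemma pv_enum_snoc {α : Type} (L : List α) (x : α) : ∀ (s : Int),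
    PySem.List.enumerate (L ++ [x]) s = PySem.List.enumerate L s ++ [(s + L.length, x)] := by
  induction L with
  | nil => intro s; simp [PySem.List.enumerate]
  | cons a t ih =>
    intro s
    have h : s + 1 + (t.length : Int) = s + ((t.length : Int) + 1) := by ring
    simp [PySem.List.enumerate_cons, ih (s + 1), h]

lemma pv_map_fst_pairs (L : List String) : (pvPairs L).map (·.1) = L := by
  simp [pvPairs, List.map_map, Function.comp_def, PySem.List.map_snd_enumerate]

lemma pv_contains_pairs (L : List String) (l : String) :
    (PySem.Dict.mk (pvPairs L)).contains l = true ↔ l ∈ L := by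
  rw [PySem.Dict.contains_iff_mem_keys, PySem.Dict.keys_mk]
  rw [show (List.map (fun x => x.1) (pvPairs L)) = L from pv_map_fst_pairs L]

-- A's loop invariant: starting from a seen list L with its pairs dict, the fold produces
-- the set-update of L and the matching pairs dict.
lemma pv_loop (labels : List String) : ∀ (L : List String),
    labels.foldl
      (fun (st : List String × PySem.Dict String Int) label =>
        if st.2.contains label then st
        else (st.1 ++ [label], st.2.insert label ((st.2.size : Int))))
      (L, PySem.Dict.mk (pvPairs L))
    = (PySem.Set.update L labels, PySem.Dict.mk (pvPairs (PySem.Set.update L labels))) := by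
  induction labels with
  | nil => intro L; simp [PySem.Set.update]
  | cons l ls ih =>
    intro L
    have hupd : PySem.Set.update L (l :: ls) = PySem.Set.update (PySem.Set.add L l) ls := by
      simp [PySem.Set.update]
    by_cases hm : l ∈ L
    · have hc : (PySem.Dict.mk (pvPairs L)).contains l = true := (pv_contains_pairs L l).mpr hm
      have hadd : PySem.Set.add L l = L := PySem.Set.add_of_mem hm
      simp only [List.foldl_cons, hc, if_true, hupd, hadd]
      exact ih L
    · have hc : (PySem.Dict.mk (pvPairs L)).contains l = false := by
        rw [Bool.eq_false_iff]
        intro h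
        exact hm ((pv_contains_pairs L l).mp h)
      have hadd : PySem.Set.add L l = L ++ [l] := PySem.Set.add_of_not_mem hm
      have hins : (PySem.Dict.mk (pvPairs L)).insert l (((PySem.Dict.mk (pvPairs L)).size : Int))
          = PySem.Dict.mk (pvPairs (L ++ [l])) := by
        simp only [PySem.Dict.insert, hc, Bool.false_eq_true, if_false]
        congr 1
        simp [pvPairs, pv_enum_snoc, PySem.Dict.size, PySem.List.length_enumerate]
      simp only [List.foldl_cons, hc, Bool.false_eq_true, if_false, hins, hupd, hadd]
      exact ih (L ++ [l])

-- B's loop only moves elements into the accumulator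
lemma pv_nubLoop_acc : ∀ (n : Nat) (rest acc : List String), rest.length ≤ n →
    pvNubLoop acc rest = acc ++ pvNubLoop [] rest := by
  intro n
  induction n with
  | zero =>
    intro rest acc h
    have : rest = [] := List.eq_nil_of_length_eq_zero (Nat.le_zero.mp h)
    subst this; simp
  | succ m ih =>
    intro rest acc h
    match rest with
    | [] => simp
    | head :: t =>
      have ht : t.length ≤ m := by simp at h; omega
      have hlen : (t.filter (fun x => decide (x ≠ head))).length ≤ m :=
        le_trans (List.length_filter_le _ t) ht
      rw [pvNubLoop_cons, pvNubLoop_cons, ih _ _ hlen, ih _ ([] ++ [head]) hlen]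
      simp

-- B's filtering nub computes exactly the seen-set dedup of A, generalized over the seen list
lemma pv_update_eq_nub : ∀ (n : Nat) (t L : List String), t.length ≤ n →
    PySem.Set.update L t = L ++ pvNubLoop [] (t.filter (fun x => decide (x ∉ L))) := by
  intro n
  induction n with
  | zero =>
    intro t L h
    have : t = [] := List.eq_nil_of_length_eq_zero (Nat.le_zero.mp h)
    subst this; simp [PySem.Set.update]
  | succ m ih =>
    intro t L h
    match t with
    | [] => simp [PySem.Set.update]
    | x :: t' =>
      have ht' : t'.length ≤ m := by simp at h; omega
      have hupd : PySem.Set.update L (x :: t') = PySem.Set.update (PySem.Set.add L x) t' := by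
        simp [PySem.Set.update]
      by_cases hm : x ∈ L
      · have : (x :: t').filter (fun x => decide (x ∉ L)) = t'.filter (fun x => decide (x ∉ L)) := by
          simp [hm]
        rw [this, hupd, PySem.Set.add_of_mem hm, ih t' L ht']
      · have hfc : (x :: t').filter (fun x => decide (x ∉ L)) = x :: t'.filter (fun x => decide (x ∉ L)) := by
          simp [hm]
        have hff : (t'.filter (fun x => decide (x ∉ L))).filter (fun y => decide (y ≠ x))
            = t'.filter (fun y => decide (y ∉ L ++ [x])) := by
          rw [List.filter_filter]
          apply List.filter_congr
          intro y _
          by_cases h1 : y ∈ L <;> by_cases h2 : y = x <;> simp [h1, h2]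
        have hflen : ((t'.filter (fun x => decide (x ∉ L))).filter (fun y => decide (y ≠ x))).length ≤ m := by
          rw [hff]; exact le_trans (List.length_filter_le _ t') ht'
        rw [hfc, pvNubLoop_cons, pv_nubLoop_acc m _ ([] ++ [x]) hflen, hff]
        rw [hupd, PySem.Set.add_of_not_mem hm, ih t' (L ++ [x]) ht']
        simp

-- specialization: B's nub of a whole list is the Set dedup
lemma pv_nub_eq_ofList (xs : List String) :
    pvNubLoop [] xs = PySem.Set.ofList xs := by
  have h := pv_update_eq_nub xs.length xs [] le_rfl
  simpa [PySem.Set.update_nil_left, List.filter_true] using h.symm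

-- B's zip pairs are A's enumerate pairs
lemma pv_enum_swap (L : List String) : ∀ (s : Int),
    (PySem.List.enumerate L s).map (fun p => (p.2, p.1))
      = L.zip ((List.range L.length).map (fun i : Nat => s + (i : Int))) := by
  induction L with
  | nil => intro s; simp [PySem.List.enumerate]
  | cons a t ih =>
    intro s
    have hr : (List.range (t.length + 1)).map (fun i : Nat => s + (i : Int))
        = s :: (List.range t.length).map (fun i : Nat => (s + 1) + (i : Int)) := by
      rw [List.range_succ_eq_map, List.map_cons, List.map_map]
      congr 1
      · simp
      · apply List.map_congr_left
        intro i _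
        simp only [Function.comp_apply, Nat.succ_eq_add_one]
        push_cast
        ring
    rw [PySem.List.enumerate_cons, List.map_cons, List.length_cons, hr, List.zip_cons_cons, ih (s + 1)]

lemma pv_pairs_eq_zip (L : List String) :
    pvPairs L = L.zip ((List.range L.length).map (fun i : Nat => (i : Int))) := by
  rw [pvPairs, pv_enum_swap L 0]
  congr 1
  apply List.map_congr_left
  intro i _
  simp

-- ===== VERDICT (by name: the statement is the Claim_ definition above) =====
theorem labels2lookup_spec : Claim_equal_labels2lookup := by
  intro labels PAD _
  unfold Spec_labels2lookup
  -- the common deduplicated label list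
  have hI : pvNubLoop [] (PAD :: labels) = PySem.Set.update [PAD] labels := by
    rw [pv_nub_eq_ofList]
    rfl
  set I := PySem.Set.update [PAD] labels with hIdef
  have hnodupI : I.Nodup := PySem.Set.nodup_update [PAD] labels (by simp)
  -- A's side
  have hinit : PySem.Dict.ofList [(PAD, (0 : Int))] = PySem.Dict.mk (pvPairs [PAD]) := by
    simp [PySem.Dict.ofList, PySem.Dict.update, PySem.Dict.insert, PySem.Dict.contains,
      PySem.Dict.empty, pvPairs, PySem.List.enumerate]
  -- B's dict items are exactly its zip list (fresh distinct keys)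
  have hzlen : I.length ≤ ((List.range I.length).map (fun i : Nat => (i : Int))).length := by simp
  have hfst : (I.zip ((List.range I.length).map (fun i : Nat => (i : Int)))).map (·.1) = I :=
    List.map_fst_zip hzlen
  have hitems : (PySem.Dict.ofList (I.zip ((List.range I.length).map (fun i : Nat => (i : Int))))).items
      = I.zip ((List.range I.length).map (fun i : Nat => (i : Int))) := by
    have h := PySem.Dict.items_foldl_insert_fresh
      (I.zip ((List.range I.length).map (fun i : Nat => (i : Int)))) Prod.fst Prod.snd PySem.Dict.empty
      (by intro a _; simp [PySem.Dict.contains, PySem.Dict.empty])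
      (by rw [show List.map Prod.fst (I.zip ((List.range I.length).map (fun i : Nat => (i : Int)))) = I from hfst]; exact hnodupI)
    simpa [PySem.Dict.ofList, PySem.Dict.update, PySem.Dict.empty] using h
  simp only [labels2lookup, labels2lookup_alt, hinit, hI]
  rw [pv_loop labels [PAD]]
  rw [← hIdef, hitems, ← pv_pairs_eq_zip]
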